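-- pv_equiv track=rewrite | github.com/Carolina1396/CBR-SUBG_MIND | data_loader/query_dataloader.py | add_inv_edges_to_adj
-- ===== SOURCE A (Python) =====
-- from copy import deepcopy
--
-- def add_inv_edges_to_adj(adj_map):
--     full_adj_map = deepcopy(adj_map)
--     for e1, re2_map in adj_map.items():
--         for r, e2_list in re2_map.items():
--             # r_inv = r + '_inv'
--             r_inv = r + "_inv" if not r.endswith("_inv") else r[:-4]
--             for e2 in e2_list:
--                 if e2 not in full_adj_map: full_adj_map[e2] = {}
--                 if r_inv not in full_adj_map[e2]: full_adj_map[e2][r_inv] = []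
--                 full_adj_map[e2][r_inv].append(e1)
--     for e1, re2_map in full_adj_map.items():
--         for r in re2_map:
--             re2_map[r] = sorted(set(re2_map[r]))
--     return full_adj_map
-- ===== SOURCE B (Python) =====
-- def add_inv_edges_to_adj(adj_map):
--     # one pass: inverse-edge index  e2 -> {r_inv: set of e1}
--     inv = {}
--     for e1, re2_map in adj_map.items():
--         for r, e2_list in re2_map.items():
--             r_inv = r[:-4] if r.endswith("_inv") else r + "_inv"
--             for e2 in e2_list:
--                 inv.setdefault(e2, {}).setdefault(r_inv, set()).add(e1)
--     # merge pass: original nodes keep their key order, inverse keys appended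
--     out = {}
--     for e1, re2_map in adj_map.items():
--         node_inv = inv.get(e1, {})
--         merged = {r: sorted(set(e2_list) | node_inv.get(r, set()))
--                   for r, e2_list in re2_map.items()}
--         for r_inv, sources in node_inv.items():
--             if r_inv not in merged:
--                 merged[r_inv] = sorted(sources)
--         out[e1] = merged
--     # nodes that only appear as targets
--     for e2, rmap in inv.items():
--         if e2 not in out:
--             out[e2] = {r_inv: sorted(sources) for r_inv, sources in rmap.items()}
--     return out
-- ===== Notes on version B (the rewrite author's own statement) =====
-- stated objective: alternative
-- what changed: B drops the deepcopy-then-mutate-then-dedup structure: it builds an inverse-edge index (target -> {r_inv: set of sources}) in one pass and then produces the final sorted deduplicated lists in a merge pass, instead of appending into a deep copy and rewriting every list with sorted(set(...)) at the end.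
import Mathlib
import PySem

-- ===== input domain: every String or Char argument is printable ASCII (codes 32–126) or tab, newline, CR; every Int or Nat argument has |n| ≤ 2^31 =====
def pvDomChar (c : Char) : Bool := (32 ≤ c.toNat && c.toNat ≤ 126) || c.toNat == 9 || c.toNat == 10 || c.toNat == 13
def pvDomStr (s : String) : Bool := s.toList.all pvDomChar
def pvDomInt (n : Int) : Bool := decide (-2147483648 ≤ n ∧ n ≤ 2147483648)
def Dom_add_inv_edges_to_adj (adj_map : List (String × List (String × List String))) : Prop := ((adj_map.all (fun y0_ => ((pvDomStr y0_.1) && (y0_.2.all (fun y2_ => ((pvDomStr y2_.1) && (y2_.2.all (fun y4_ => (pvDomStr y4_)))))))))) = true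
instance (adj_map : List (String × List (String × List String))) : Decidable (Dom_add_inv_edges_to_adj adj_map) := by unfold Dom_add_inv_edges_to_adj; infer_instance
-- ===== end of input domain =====

-- B replaces A's deepcopy-then-mutate-then-dedup with an inverse-edge index built in one pass
-- and a merge pass producing the sorted deduplicated lists directly (objective: alternative).

-- r_inv = r + "_inv" if not r.endswith("_inv") else r[:-4]   (shared by both sources verbatim)
def pvRInv (r : String) : String :=
  if PySem.Str.endswith r "_inv" then PySem.Str.slice r none (some (-4)) else r ++ "_inv"

-- ===== PORT A =====
def add_inv_edges_to_adj (adj_map : List (String × List (String × List String))) : List (String × List (String × List String)) :=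
  -- full_adj_map = deepcopy(adj_map)
  let full0 : PySem.Dict String (PySem.Dict String (List String)) :=
    PySem.Dict.mk (adj_map.map (fun p => (p.1, PySem.Dict.mk p.2)))
  -- triple loop appending e1 under full_adj_map[e2][r_inv]
  let full := adj_map.foldl (fun full p =>
    p.2.foldl (fun full q =>
      let r_inv := pvRInv q.1
      q.2.foldl (fun full e2 =>
        let full := if full.contains e2 then full else full.insert e2 PySem.Dict.empty
        let inner := full.getD e2 PySem.Dict.empty
        let inner := if inner.contains r_inv then inner else inner.insert r_inv []
        full.insert e2 (inner.insert r_inv (inner.getD r_inv [] ++ [p.1]))) full) full) full0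
  -- for e1, re2_map in full_adj_map.items(): for r in re2_map: re2_map[r] = sorted(set(re2_map[r]))
  full.items.map (fun p =>
    (p.1, (p.2.keys.foldl (fun rm r =>
        rm.insert r (PySem.List.sorted (PySem.Set.ofList (rm.getD r [])) (fun x => x) false)) p.2).items))

-- ===== PORT B =====
def add_inv_edges_to_adj_alt (adj_map : List (String × List (String × List String))) : List (String × List (String × List String)) :=
  -- inverse-edge index: e2 -> {r_inv: set of e1}
  let inv := adj_map.foldl (fun inv p =>
    p.2.foldl (fun inv q =>
      let r_inv := pvRInv q.1
      q.2.foldl (fun inv e2 =>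
        let node := inv.getD e2 PySem.Dict.empty
        inv.insert e2 (node.insert r_inv (PySem.Set.add (node.getD r_inv []) p.1))) inv) inv)
    (PySem.Dict.empty : PySem.Dict String (PySem.Dict String (PySem.Set String)))
  -- merge pass over the original nodes
  let out := adj_map.foldl (fun out p =>
    let node_inv := inv.getD p.1 PySem.Dict.empty
    let merged := p.2.foldl (fun m q =>
        m.insert q.1 (PySem.List.sorted
          (PySem.Set.union (PySem.Set.ofList q.2) (node_inv.getD q.1 [])) (fun x => x) false))
      (PySem.Dict.empty : PySem.Dict String (List String))
    let merged := node_inv.items.foldl (fun m q =>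
        if m.contains q.1 then m
        else m.insert q.1 (PySem.List.sorted q.2 (fun x => x) false)) merged
    out.insert p.1 merged)
    (PySem.Dict.empty : PySem.Dict String (PySem.Dict String (List String)))
  -- nodes that only appear as targets
  let out := inv.items.foldl (fun out p =>
    if out.contains p.1 then out
    else out.insert p.1
      (p.2.items.foldl (fun d q => d.insert q.1 (PySem.List.sorted q.2 (fun x => x) false))
        (PySem.Dict.empty : PySem.Dict String (List String)))) out
  out.items.map (fun p => (p.1, p.2.items))

-- ===== PRECONDITION & SPEC =====
-- Pre_ states that the association list encodes a Python dict of dicts: no duplicate keys at either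
-- level (a Python dict cannot contain duplicate keys, so every input A accepts satisfies this).
def Pre_add_inv_edges_to_adj (adj_map : List (String × List (String × List String))) : Prop :=
  (adj_map.map Prod.fst).Nodup ∧ ∀ p ∈ adj_map, (p.2.map Prod.fst).Nodup
instance (adj_map : List (String × List (String × List String))) : Decidable (Pre_add_inv_edges_to_adj adj_map) := by unfold Pre_add_inv_edges_to_adj; infer_instance

def pvWitness_add_inv_edges_to_adj : (List (String × List (String × List String))) :=
  [("a", [("r", ["b", "c"])]), ("b", [("s_inv", ["a"])])]

def Spec_add_inv_edges_to_adj (adj_map : List (String × List (String × List String))) (out : List (String × List (String × List String))) : Prop := out = add_inv_edges_to_adj_alt adj_map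
instance (adj_map : List (String × List (String × List String))) (out : List (String × List (String × List String))) : Decidable (Spec_add_inv_edges_to_adj adj_map out) := by unfold Spec_add_inv_edges_to_adj; infer_instance

-- ===== CLAIM (what is proved, stated in full; the proofs are below) =====
def Claim_equal_add_inv_edges_to_adj : Prop := ∀ (adj_map : List (String × List (String × List String))), Dom_add_inv_edges_to_adj adj_map → Pre_add_inv_edges_to_adj adj_map → Spec_add_inv_edges_to_adj adj_map (add_inv_edges_to_adj adj_map)

-- ===== LEMMAS AND PROOFS =====

-- the stream of inverse-edge events (target, inverse relation, source), in traversal order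
def pvEvs (adj_map : List (String × List (String × List String))) : List (String × String × String) :=
  adj_map.flatMap (fun p => p.2.flatMap (fun q => q.2.map (fun e2 => (e2, pvRInv q.1, p.1))))

def pvE (adj_map : List (String × List (String × List String))) (n : String) : List (String × String × String) :=
  (pvEvs adj_map).filter (fun e => e.1 == n)

def pvSrcs (adj_map : List (String × List (String × List String))) (n r : String) : List String :=
  ((pvE adj_map n).filter (fun e => e.2.1 == r)).map (fun e => e.2.2)

def pvRis (adj_map : List (String × List (String × List String))) (n : String) : PySem.Set String :=
  PySem.Set.ofList ((pvE adj_map n).map (fun e => e.2.1))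

def pvTgts (adj_map : List (String × List (String × List String))) : PySem.Set String :=
  PySem.Set.ofList ((pvEvs adj_map).map (fun e => e.1))

def pvSortedSet (l : List String) : List String :=
  PySem.List.sorted (PySem.Set.ofList l) (fun x => x) false

def pvCanon (adj_map : List (String × List (String × List String))) : List (String × List (String × List String)) :=
  adj_map.map (fun p =>
    (p.1, p.2.map (fun q => (q.1, pvSortedSet (q.2 ++ pvSrcs adj_map p.1 q.1)))
      ++ ((pvRis adj_map p.1).filter (fun r => !(p.2.any (fun q => q.1 == r)))).map
          (fun r => (r, pvSortedSet (pvSrcs adj_map p.1 r)))))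
  ++ ((pvTgts adj_map).filter (fun k => !(adj_map.any (fun p => p.1 == k)))).map
      (fun n => (n, (pvRis adj_map n).map (fun r => (r, pvSortedSet (pvSrcs adj_map n r)))))

theorem pvE_def (adj_map : List (String × List (String × List String))) (n : String) :
    (pvEvs adj_map).filter (fun e => e.1 == n) = pvE adj_map n := rfl

theorem pv_foldl_flatMap {σ α β : Type} (g : α → List β) (f : σ → β → σ) (l : List α) (s : σ) :
    l.foldl (fun s a => (g a).foldl f s) s = (l.flatMap g).foldl f s := by
  induction l generalizing s with
  | nil => rfl
  | cons a t ih => simp [List.foldl_append, ih]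

theorem pv_items_foldIG {κ ν ε : Type} [BEq κ] [LawfulBEq κ]
    (key : ε → κ) (f : ε → ν → ν) (dflt : ν) (E : List ε) : ∀ (d0 : PySem.Dict κ ν),
    d0.keys.Nodup →
    (E.foldl (fun d e => d.insert (key e) (f e (d.getD (key e) dflt))) d0).items =
      d0.items.map (fun p => (p.1, ((E.filter (fun e => key e == p.1)).foldl (fun v e => f e v) p.2)))
      ++ ((PySem.Set.ofList (E.map key)).filter (fun k => !(d0.contains k))).map
          (fun k => (k, ((E.filter (fun e => key e == k)).foldl (fun v e => f e v) dflt))) := by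
  induction E with
  | nil => intro d0 h; simp [PySem.Set.ofList]
  | cons e E ih =>
    intro d0 h
    simp only [List.foldl_cons]
    rw [ih _ (PySem.Dict.nodup_keys_insert _ _ _ h)]
    by_cases hc : d0.contains (key e) = true
    · rw [PySem.Dict.items_insert_of_contains _ _ hc]
      congr 1
      · -- first parts
        rw [List.map_map]
        apply List.map_congr_left
        intro p hp
        by_cases hpk : p.1 = key e
        · have hbeq : (p.1 == key e) = true := by simp [hpk]
          have hgd : d0.getD (key e) dflt = p.2 := by
            rw [← hpk]
            exact PySem.Dict.getD_of_mem_items d0 hp h dflt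
          simp only [Function.comp, hbeq, if_pos]
          simp [hpk, hgd]
        · have hbeq : (p.1 == key e) = false := by simp [hpk]
          have hbeq2 : (key e == p.1) = false := by simp [Ne.symm hpk]
          simp [Function.comp, hbeq, hbeq2]
      · -- second parts
        rw [List.map_cons, PySem.Set.ofList_cons]
        have hko : ((key e :: (PySem.Set.ofList (E.map key)).discard (key e)).filter
            (fun k => !(d0.contains k))) = ((PySem.Set.ofList (E.map key)).discard (key e)).filter
            (fun k => !(d0.contains k)) := by
          simp [hc]
        rw [hko]
        simp only [PySem.Set.discard, List.filter_filter]
        have : ∀ (k : κ), ((!d0.contains k) && !(k == key e)) = !((d0.insert (key e) (f e (d0.getD (key e) dflt))).contains k) := by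
          intro k
          rw [PySem.Dict.contains_insert]
          cases hk : (k == key e) <;> cases hdk : d0.contains k <;> simp [hk, hdk]
        rw [show (fun a => (!d0.contains a) && !(a == key e)) = (fun k => !((d0.insert (key e) (f e (d0.getD (key e) dflt))).contains k)) from funext this]
        apply List.map_congr_left
        intro k hk
        have hk2 : (d0.insert (key e) (f e (d0.getD (key e) dflt))).contains k = false := by
          have := (List.mem_filter.mp hk).2; simpa using this
        have hkne : (key e == k) = false := by
          rw [PySem.Dict.contains_insert] at hk2
          cases hh : (k == key e)
          · simp [BEq.comm] at hh ⊢; exact fun hee => by simp [hee] at hh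
          · simp [hh] at hk2
        simp [hkne]
    · -- key e fresh
      have hcf : d0.contains (key e) = false := by simpa using hc
      rw [PySem.Dict.items_insert_of_not_contains _ _ hcf,
          PySem.Dict.getD_of_not_contains _ _ hcf]
      simp only [List.map_append, List.map_cons, List.map_nil, PySem.Set.ofList_cons]
      rw [List.append_assoc]
      have hmemkeys : ∀ p ∈ d0.items, (key e == p.1) = false := by
        intro p hp
        cases hh : (key e == p.1)
        · rfl
        · exfalso
          have : d0.contains p.1 = true := by
            simp only [PySem.Dict.contains, List.any_eq_true]
            exact ⟨p, hp, by simp⟩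
          rw [show p.1 = key e from (eq_of_beq hh).symm] at this
          simp [this] at hcf
      have h1 : (!d0.contains (key e)) = true := by simp [hcf]
      have hhead : ((key e :: (PySem.Set.ofList (E.map key)).discard (key e)).filter (fun k => !d0.contains k)) = key e :: (((PySem.Set.ofList (E.map key)).discard (key e)).filter (fun k => !d0.contains k)) := by
        simp [h1]
      rw [hhead, List.map_cons]
      congr 1
      · -- original items
        apply List.map_congr_left
        intro p hp
        simp [hmemkeys p hp]
      · -- new head and tail
        simp only [List.singleton_append]
        congr 1
        · have hself : (key e == key e) = true := by simp
          simp [hself]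
        · -- tails
          simp only [PySem.Set.discard, List.filter_filter]
          have hpred : ∀ (k : κ), ((!d0.contains k) && !(k == key e)) = !((d0.insert (key e) (f e dflt)).contains k) := by
            intro k
            rw [PySem.Dict.contains_insert]
            cases hk : (k == key e) <;> cases hdk : d0.contains k <;> simp [hk, hdk]
          rw [show (fun a => (!d0.contains a) && !(a == key e)) = (fun k => !((d0.insert (key e) (f e dflt)).contains k)) from funext hpred]
          apply List.map_congr_left
          intro k hk
          have hk2 : (d0.insert (key e) (f e dflt)).contains k = false := by
            have := (List.mem_filter.mp hk).2; simpa using this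
          have hkne : (key e == k) = false := by
            rw [PySem.Dict.contains_insert] at hk2
            cases hh : (k == key e)
            · cases hh2 : (key e == k)
              · rfl
              · exfalso; rw [eq_of_beq hh2] at hh; simp at hh
            · simp [hh] at hk2
          simp [hkne]

theorem pv_items_condFold {κ ν μ : Type} [BEq κ] [LawfulBEq κ]
    (g : κ × μ → ν) (l : List (κ × μ)) : ∀ (m : PySem.Dict κ ν),
    (l.map Prod.fst).Nodup →
    (l.foldl (fun m p => if m.contains p.1 then m else m.insert p.1 (g p)) m).items =
      m.items ++ (l.filter (fun p => !(m.contains p.1))).map (fun p => (p.1, g p)) := by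
  induction l with
  | nil => intro m h; simp
  | cons p l ih =>
    intro m h
    rw [List.map_cons] at h
    have h' := List.nodup_cons.mp h
    simp only [List.foldl_cons, List.filter_cons]
    by_cases hc : m.contains p.1 = true
    · simp only [hc, Bool.not_true, Bool.false_eq_true, if_true, if_false]
      exact ih m h'.2
    · have hcf : m.contains p.1 = false := by simpa using hc
      simp only [hcf, Bool.not_false, Bool.false_eq_true, if_true, if_false, List.map_cons]
      rw [ih (m.insert p.1 (g p)) h'.2]
      rw [PySem.Dict.items_insert_of_not_contains _ _ hcf]
      rw [List.append_assoc, List.singleton_append]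
      congr 2
      congr 1
      apply List.filter_congr
      intro q hq
      have hne : (q.1 == p.1) = false := by
        cases hh : (q.1 == p.1)
        · rfl
        · exact absurd (eq_of_beq hh ▸ List.mem_map_of_mem hq) h'.1
      rw [PySem.Dict.contains_insert]
      simp [hne]

theorem pv_items_mapVals {κ ν : Type} [BEq κ] [LawfulBEq κ]
    (g : ν → ν) (dflt : ν) (rm : PySem.Dict κ ν) (h : rm.keys.Nodup) :
    (rm.keys.foldl (fun d r => d.insert r (g (d.getD r dflt))) rm).items =
      rm.items.map (fun p => (p.1, g p.2)) := by
  have master := pv_items_foldIG (fun (e : κ) => e) (fun _ v => g v) dflt rm.keys rm h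
  beta_reduce at master
  simp only [List.map_id'] at master
  rw [master]
  have h2 : ((PySem.Set.ofList rm.keys).filter (fun k => !(rm.contains k))) = [] := by
    apply List.filter_eq_nil_iff.mpr
    intro k hk
    have : k ∈ rm.keys := (PySem.Set.mem_ofList _ k).mp hk
    simp [(PySem.Dict.contains_iff_mem_keys rm k).mpr this]
  rw [h2]
  simp only [List.map_nil, List.append_nil]
  apply List.map_congr_left
  intro p hp
  have hmem : p.1 ∈ rm.keys := by
    simp only [PySem.Dict.keys]
    exact List.mem_map_of_mem hp
  have : rm.keys.filter (fun e => e == p.1) = [p.1] := by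
    rw [List.filter_beq, List.count_eq_one_of_mem h hmem, List.replicate_one]
  rw [this]
  rfl

-- step of A's triple loop, rewritten to insert-getD form
theorem pv_stepA (full : PySem.Dict String (PySem.Dict String (List String))) (e2 ri e1 : String) :
    (let full' := if full.contains e2 then full else full.insert e2 PySem.Dict.empty
     let inner := full'.getD e2 PySem.Dict.empty
     let inner' := if inner.contains ri then inner else inner.insert ri []
     full'.insert e2 (inner'.insert ri (inner'.getD ri [] ++ [e1])))
    = full.insert e2 ((full.getD e2 PySem.Dict.empty).insert ri
        ((full.getD e2 PySem.Dict.empty).getD ri [] ++ [e1])) := by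
  by_cases hc : full.contains e2 = true
  · simp only [hc, if_true]
    by_cases hr : (full.getD e2 PySem.Dict.empty).contains ri = true
    · simp only [hr, if_true]
    · have hrf : (full.getD e2 PySem.Dict.empty).contains ri = false := by simpa using hr
      simp only [hrf, Bool.false_eq_true, if_false,
        PySem.Dict.getD_insert_self, PySem.Dict.insert_insert_self,
        PySem.Dict.getD_of_not_contains _ _ hrf]
  · have hcf : full.contains e2 = false := by simpa using hc
    simp only [hcf, Bool.false_eq_true, if_false, PySem.Dict.getD_insert_self,
      PySem.Dict.insert_insert_self, PySem.Dict.getD_of_not_contains _ _ hcf,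
      PySem.Dict.contains_empty, if_false, PySem.Dict.getD_empty]

theorem pv_A_loop (adj_map : List (String × List (String × List String)))
    (full0 : PySem.Dict String (PySem.Dict String (List String))) :
    (adj_map.foldl (fun full p =>
      p.2.foldl (fun full q =>
        let r_inv := pvRInv q.1
        q.2.foldl (fun full e2 =>
          let full := if full.contains e2 then full else full.insert e2 PySem.Dict.empty
          let inner := full.getD e2 PySem.Dict.empty
          let inner := if inner.contains r_inv then inner else inner.insert r_inv []
          full.insert e2 (inner.insert r_inv (inner.getD r_inv [] ++ [p.1]))) full) full) full0)
    = (pvEvs adj_map).foldl (fun d e => d.insert e.1 ((d.getD e.1 PySem.Dict.empty).insert e.2.1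
        ((d.getD e.1 PySem.Dict.empty).getD e.2.1 [] ++ [e.2.2]))) full0 := by
  unfold pvEvs
  rw [← pv_foldl_flatMap]
  apply PySem.List.foldl_congr_mem
  intro full p _
  rw [← pv_foldl_flatMap]
  apply PySem.List.foldl_congr_mem
  intro full q _
  rw [List.foldl_map]
  apply PySem.List.foldl_congr_mem
  intro full e2 _
  exact pv_stepA full e2 (pvRInv q.1) p.1

-- items of the inner (per-node) fold of A
theorem pv_A_inner_items (adj_map : List (String × List (String × List String))) (n : String)
    (d0 : PySem.Dict String (List String)) (h : d0.keys.Nodup) :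
    ((pvE adj_map n).foldl (fun v e => v.insert e.2.1 (v.getD e.2.1 [] ++ [e.2.2])) d0).items =
      d0.items.map (fun q => (q.1, q.2 ++ pvSrcs adj_map n q.1))
      ++ ((pvRis adj_map n).filter (fun r => !(d0.contains r))).map
          (fun r => (r, pvSrcs adj_map n r)) := by
  rw [pv_items_foldIG (fun e => e.2.1) (fun e v => v ++ [e.2.2]) [] (pvE adj_map n) d0 h]
  unfold pvRis pvSrcs
  congr 1
  · apply List.map_congr_left
    intro q _
    rw [PySem.List.foldl_append_singleton_eq_map (f := fun (e : String × String × String) => e.2.2)]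
  · apply List.map_congr_left
    intro r _
    rw [PySem.List.foldl_append_singleton_eq_map (f := fun (e : String × String × String) => e.2.2)]
    simp


theorem pv_A_eq (adj_map : List (String × List (String × List String)))
    (h1 : (adj_map.map Prod.fst).Nodup)
    (h2 : ∀ p ∈ adj_map, (p.2.map Prod.fst).Nodup) :
    add_inv_edges_to_adj adj_map = pvCanon adj_map := by
  have hfull0 : (PySem.Dict.mk (adj_map.map (fun p => (p.1, PySem.Dict.mk p.2)))).keys.Nodup := by
    simpa [PySem.Dict.keys_mk, List.map_map, Function.comp] using h1
  unfold add_inv_edges_to_adj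
  dsimp only
  rw [pv_A_loop]
  rw [pv_items_foldIG (fun (e : String × String × String) => e.1)
    (fun (e : String × String × String) (inner : PySem.Dict String (List String)) =>
      inner.insert e.2.1 (inner.getD e.2.1 [] ++ [e.2.2]))
    PySem.Dict.empty (pvEvs adj_map) _ hfull0]
  simp only [pvE_def]
  have hinnernodup : ∀ (n : String) (d0 : PySem.Dict String (List String)), d0.keys.Nodup →
      ((pvE adj_map n).foldl (fun v e => v.insert e.2.1 (v.getD e.2.1 [] ++ [e.2.2])) d0).keys.Nodup :=
    fun n d0 h => PySem.Dict.nodup_keys_foldl_insert_key _ (fun (e : String × String × String) => e.2.1)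
      (fun (d : PySem.Dict String (List String)) (e : String × String × String) => d.getD e.2.1 [] ++ [e.2.2]) d0 h
  unfold pvCanon pvTgts
  rw [List.map_append]
  congr 1
  · -- original nodes
    simp only [List.map_map]
    apply List.map_congr_left
    intro p hp
    have hmk : (PySem.Dict.mk p.2 : PySem.Dict String (List String)).keys.Nodup := by
      simpa [PySem.Dict.keys_mk] using h2 p hp
    simp only [Function.comp]
    rw [pv_items_mapVals (fun l => PySem.List.sorted (PySem.Set.ofList l) (fun x => x) false) []
      _ (hinnernodup p.1 _ hmk)]
    rw [pv_A_inner_items adj_map p.1 _ hmk]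
    rw [List.map_append, List.map_map, List.map_map]
    rfl
  · -- fresh target nodes
    rw [List.map_map]
    have hcond : (fun k => !((PySem.Dict.mk (adj_map.map (fun p => (p.1, PySem.Dict.mk p.2)))
        : PySem.Dict String (PySem.Dict String (List String))).contains k))
        = (fun k => !(adj_map.any (fun p => p.1 == k))) := by
      funext k
      simp [PySem.Dict.contains, List.any_map, Function.comp_def]
    rw [hcond]
    apply List.map_congr_left
    intro n hn
    simp only [Function.comp]
    rw [pv_items_mapVals (fun l => PySem.List.sorted (PySem.Set.ofList l) (fun x => x) false) []
      _ (hinnernodup n _ (by simp [PySem.Dict.keys_empty]))]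
    rw [pv_A_inner_items adj_map n _ (by simp [PySem.Dict.keys_empty])]
    simp [PySem.Dict.empty, Function.comp_def, pvSortedSet]

def pvInv (adj_map : List (String × List (String × List String))) : PySem.Dict String (PySem.Dict String (PySem.Set String)) :=
  (pvEvs adj_map).foldl (fun d e => d.insert e.1 ((d.getD e.1 PySem.Dict.empty).insert e.2.1
    (PySem.Set.add ((d.getD e.1 PySem.Dict.empty).getD e.2.1 []) e.2.2))) PySem.Dict.empty

theorem pv_B_loop (adj_map : List (String × List (String × List String))) :
    (adj_map.foldl (fun inv p =>
      p.2.foldl (fun inv q =>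
        let r_inv := pvRInv q.1
        q.2.foldl (fun inv e2 =>
          let node := inv.getD e2 PySem.Dict.empty
          inv.insert e2 (node.insert r_inv (PySem.Set.add (node.getD r_inv []) p.1))) inv) inv)
      (PySem.Dict.empty : PySem.Dict String (PySem.Dict String (PySem.Set String))))
    = pvInv adj_map := by
  unfold pvInv pvEvs
  rw [← pv_foldl_flatMap]
  apply PySem.List.foldl_congr_mem
  intro inv p _
  rw [← pv_foldl_flatMap]
  apply PySem.List.foldl_congr_mem
  intro inv q _
  rw [List.foldl_map]

def pvInvInner (adj_map : List (String × List (String × List String))) (n : String) :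
    PySem.Dict String (PySem.Set String) :=
  PySem.Dict.mk ((pvRis adj_map n).map (fun r => (r, PySem.Set.ofList (pvSrcs adj_map n r))))

theorem pv_setfold (L : List (String × String × String)) :
    L.foldl (fun s e => PySem.Set.add s e.2.2) ([] : PySem.Set String)
      = PySem.Set.ofList (L.map (fun e => e.2.2)) := by
  rw [← PySem.Set.update_map_eq_foldl_add, PySem.Set.update_nil_left]

theorem pv_inv_items (adj_map : List (String × List (String × List String))) :
    (pvInv adj_map).items =
      (PySem.Set.ofList ((pvEvs adj_map).map (fun e => e.1))).map
        (fun n => (n, pvInvInner adj_map n)) := by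
  unfold pvInv
  rw [pv_items_foldIG (fun (e : String × String × String) => e.1)
    (fun (e : String × String × String) (node : PySem.Dict String (PySem.Set String)) =>
      node.insert e.2.1 (PySem.Set.add (node.getD e.2.1 []) e.2.2))
    PySem.Dict.empty (pvEvs adj_map) PySem.Dict.empty (by simp [PySem.Dict.keys_empty])]
  simp only [pvE_def, PySem.Dict.empty, PySem.Dict.contains_mk, List.any_nil, Bool.not_false,
    List.filter_true, List.map_nil, List.nil_append]
  apply List.map_congr_left
  intro n hn
  congr 1
  apply PySem.Dict.ext
  show _ = (pvInvInner adj_map n).items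
  have : (PySem.Dict.mk [] : PySem.Dict String (PySem.Set String)) = PySem.Dict.empty := rfl
  rw [this, pv_items_foldIG (fun (e : String × String × String) => e.2.1)
    (fun (e : String × String × String) (s : PySem.Set String) => PySem.Set.add s e.2.2)
    [] (pvE adj_map n) PySem.Dict.empty (by simp [PySem.Dict.keys_empty])]
  unfold pvInvInner pvRis pvSrcs
  simp only [PySem.Dict.empty, List.map_nil, List.nil_append, PySem.Dict.contains_mk,
    List.any_nil, Bool.not_false, List.filter_true]
  apply List.map_congr_left
  intro r hr
  rw [pv_setfold]

theorem pv_inv_keys_nodup (adj_map : List (String × List (String × List String))) :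
    (pvInv adj_map).keys.Nodup := by
  unfold pvInv
  exact PySem.Dict.nodup_keys_foldl_insert_key _ (fun (e : String × String × String) => e.1)
    _ _ (by simp [PySem.Dict.keys_empty])

theorem pv_E_eq_nil_of_not_mem (adj_map : List (String × List (String × List String))) (n : String)
    (h : n ∉ (pvEvs adj_map).map (fun e => e.1)) : pvE adj_map n = [] := by
  unfold pvE
  apply List.filter_eq_nil_iff.mpr
  intro e he
  cases hb : (e.1 == n)
  · simp
  · exact absurd (eq_of_beq hb ▸ List.mem_map_of_mem he) h

theorem pv_nodeInv_items (adj_map : List (String × List (String × List String))) (n : String) :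
    ((pvInv adj_map).getD n PySem.Dict.empty).items =
      (pvRis adj_map n).map (fun r => (r, PySem.Set.ofList (pvSrcs adj_map n r))) := by
  by_cases hm : n ∈ (pvEvs adj_map).map (fun e => e.1)
  · have hmem : (n, pvInvInner adj_map n) ∈ (pvInv adj_map).items := by
      rw [pv_inv_items]
      exact List.mem_map_of_mem ((PySem.Set.mem_ofList _ n).mpr hm)
    rw [PySem.Dict.getD_of_mem_items _ hmem (pv_inv_keys_nodup adj_map)]
    rfl
  · have hnil : pvE adj_map n = [] := pv_E_eq_nil_of_not_mem adj_map n hm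
    have hc : (pvInv adj_map).contains n = false := by
      cases hcc : (pvInv adj_map).contains n
      · rfl
      · exfalso
        have : n ∈ (pvInv adj_map).keys := (PySem.Dict.contains_iff_mem_keys _ n).mp hcc
        simp only [PySem.Dict.keys, pv_inv_items, List.map_map] at this
        obtain ⟨k, hk, hkn⟩ := List.mem_map.mp this
        have hk2 : k = n := by simpa using hkn
        subst hk2
        exact hm ((PySem.Set.mem_ofList _ k).mp hk)
    rw [PySem.Dict.getD_of_not_contains _ _ hc]
    simp [pvRis, hnil, PySem.Dict.empty]

theorem pv_nodeInv_getD (adj_map : List (String × List (String × List String))) (n r : String) :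
    ((pvInv adj_map).getD n PySem.Dict.empty).getD r [] =
      PySem.Set.ofList (pvSrcs adj_map n r) := by
  have hitems := pv_nodeInv_items adj_map n
  have hkeysnd : ((pvInv adj_map).getD n PySem.Dict.empty).keys.Nodup := by
    simp only [PySem.Dict.keys, hitems, List.map_map]
    have : ((fun p => p.1) ∘ fun r => (r, PySem.Set.ofList (pvSrcs adj_map n r))) = id := rfl
    rw [this, List.map_id]
    exact PySem.Set.nodup_ofList _
  by_cases hr : r ∈ pvRis adj_map n
  · exact PySem.Dict.getD_of_mem_items _ (by rw [hitems]; exact List.mem_map_of_mem hr) hkeysnd []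
  · have hc : ((pvInv adj_map).getD n PySem.Dict.empty).contains r = false := by
      cases hcc : ((pvInv adj_map).getD n PySem.Dict.empty).contains r
      · rfl
      · exfalso
        have : r ∈ ((pvInv adj_map).getD n PySem.Dict.empty).keys :=
          (PySem.Dict.contains_iff_mem_keys _ r).mp hcc
        simp only [PySem.Dict.keys, hitems, List.map_map] at this
        obtain ⟨k, hk, hkn⟩ := List.mem_map.mp this
        have hk2 : k = r := by simpa using hkn
        subst hk2
        exact hr hk
    rw [PySem.Dict.getD_of_not_contains _ _ hc]
    have hsrc : pvSrcs adj_map n r = [] := by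
      unfold pvSrcs
      have : (pvE adj_map n).filter (fun e => e.2.1 == r) = [] := by
        apply List.filter_eq_nil_iff.mpr
        intro e he
        cases hb : (e.2.1 == r)
        · simp
        · exfalso
          apply hr
          apply (PySem.Set.mem_ofList _ r).mpr
          rw [← eq_of_beq hb]
          exact List.mem_map_of_mem he
      rw [this]; rfl
    rw [hsrc]; rfl

theorem pv_union_ofList (a b : List String) :
    PySem.Set.union (PySem.Set.ofList a) (PySem.Set.ofList b) = PySem.Set.ofList (a ++ b) := by
  show (PySem.Set.ofList a).update (PySem.Set.ofList b) = _
  rw [PySem.Set.ofList_append, PySem.Set.update_eq_append_filter, PySem.Set.update_eq_append_filter,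
    PySem.Set.ofList_ofList]

def pvMerged (adj_map : List (String × List (String × List String)))
    (p : String × List (String × List String)) : PySem.Dict String (List String) :=
  ((pvInv adj_map).getD p.1 PySem.Dict.empty).items.foldl
    (fun m q => if m.contains q.1 then m else m.insert q.1 (PySem.List.sorted q.2 (fun x => x) false))
    (p.2.foldl (fun m q => m.insert q.1 (PySem.List.sorted
        (PySem.Set.union (PySem.Set.ofList q.2) (((pvInv adj_map).getD p.1 PySem.Dict.empty).getD q.1 []))
        (fun x => x) false))
      (PySem.Dict.empty : PySem.Dict String (List String)))

theorem pv_out_items (adj_map : List (String × List (String × List String)))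
    (h1 : (adj_map.map Prod.fst).Nodup) :
    (adj_map.foldl (fun out p => out.insert p.1 (pvMerged adj_map p))
        (PySem.Dict.empty : PySem.Dict String (PySem.Dict String (List String)))).items =
      adj_map.map (fun p => (p.1, pvMerged adj_map p)) := by
  rw [PySem.Dict.items_foldl_insert_fresh adj_map Prod.fst (pvMerged adj_map) _
    (fun a _ => by simp [PySem.Dict.contains_empty]) h1]
  simp [PySem.Dict.empty]

theorem pv_merged_items (adj_map : List (String × List (String × List String)))
    (p : String × List (String × List String)) (hp2 : (p.2.map Prod.fst).Nodup) :
    (pvMerged adj_map p).items =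
      p.2.map (fun q => (q.1, pvSortedSet (q.2 ++ pvSrcs adj_map p.1 q.1)))
      ++ ((pvRis adj_map p.1).filter (fun r => !(p.2.any (fun q => q.1 == r)))).map
          (fun r => (r, pvSortedSet (pvSrcs adj_map p.1 r))) := by
  unfold pvMerged
  have hl : ((((pvInv adj_map).getD p.1 PySem.Dict.empty).items).map Prod.fst).Nodup := by
    rw [pv_nodeInv_items, List.map_map]
    have : (Prod.fst ∘ fun r => (r, PySem.Set.ofList (pvSrcs adj_map p.1 r))) = id := rfl
    rw [this, List.map_id]
    exact PySem.Set.nodup_ofList _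
  rw [pv_items_condFold (fun (q : String × PySem.Set String) => PySem.List.sorted q.2 (fun x => x) false)
    _ _ hl]
  simp only [PySem.Dict.contains]
  rw [PySem.Dict.items_foldl_insert_fresh p.2 Prod.fst
    (fun q => PySem.List.sorted (PySem.Set.union (PySem.Set.ofList q.2)
      (((pvInv adj_map).getD p.1 PySem.Dict.empty).getD q.1 [])) (fun x => x) false)
    _ (fun a _ => by simp [PySem.Dict.contains_empty]) hp2]
  simp only [pv_nodeInv_getD, pv_nodeInv_items, pv_union_ofList]
  simp only [PySem.Dict.empty, List.nil_append]
  congr 1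
  rw [List.filter_map]
  simp only [Function.comp_def, List.any_map, List.map_map]
  rfl

theorem pv_B_eq (adj_map : List (String × List (String × List String)))
    (h1 : (adj_map.map Prod.fst).Nodup)
    (h2 : ∀ p ∈ adj_map, (p.2.map Prod.fst).Nodup) :
    add_inv_edges_to_adj_alt adj_map = pvCanon adj_map := by
  unfold add_inv_edges_to_adj_alt
  dsimp only
  rw [pv_B_loop]
  show ((pvInv adj_map).items.foldl (fun out p =>
      if out.contains p.1 then out
      else out.insert p.1
        (p.2.items.foldl (fun d q => d.insert q.1 (PySem.List.sorted q.2 (fun x => x) false))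
          (PySem.Dict.empty : PySem.Dict String (List String))))
      (adj_map.foldl (fun out p => out.insert p.1 (pvMerged adj_map p))
        (PySem.Dict.empty : PySem.Dict String (PySem.Dict String (List String))))).items.map
      (fun p => (p.1, p.2.items)) = pvCanon adj_map
  have hInvNodup : (((pvInv adj_map).items).map Prod.fst).Nodup := pv_inv_keys_nodup adj_map
  rw [pv_items_condFold (fun (p : String × PySem.Dict String (PySem.Set String)) =>
      p.2.items.foldl (fun d q => d.insert q.1 (PySem.List.sorted q.2 (fun x => x) false))
        (PySem.Dict.empty : PySem.Dict String (List String)))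
    ((pvInv adj_map).items) _ hInvNodup]
  simp only [PySem.Dict.contains]
  rw [pv_out_items adj_map h1]
  unfold pvCanon pvTgts
  rw [List.map_append]
  congr 1
  · -- original nodes
    simp only [List.map_map]
    apply List.map_congr_left
    intro p hp
    simp only [Function.comp_def]
    rw [pv_merged_items adj_map p (h2 p hp)]
  · -- fresh target nodes
    rw [pv_inv_items, List.filter_map, List.map_map, List.map_map]
    simp only [Function.comp_def, List.any_map]
    apply List.map_congr_left
    intro n hn
    have hfresh : ((pvInvInner adj_map n).items.map Prod.fst).Nodup := by
      unfold pvInvInner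
      rw [PySem.Dict.items]
      rw [List.map_map]
      have : (Prod.fst ∘ fun r => (r, PySem.Set.ofList (pvSrcs adj_map n r))) = id := rfl
      rw [this, List.map_id]
      exact PySem.Set.nodup_ofList _
    rw [PySem.Dict.items_foldl_insert_fresh (pvInvInner adj_map n).items Prod.fst
      (fun q => PySem.List.sorted q.2 (fun x => x) false) _
      (fun a _ => by simp [PySem.Dict.contains_empty]) hfresh]
    simp only [PySem.Dict.empty, List.nil_append]
    unfold pvInvInner
    simp only [List.map_map]
    rfl

-- ===== VERDICT (by name: the statement is the Claim_ definition above) =====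
theorem add_inv_edges_to_adj_spec : Claim_equal_add_inv_edges_to_adj := by
  intro adj_map _hdom hpre
  unfold Spec_add_inv_edges_to_adj
  rw [pv_A_eq adj_map hpre.1 hpre.2, pv_B_eq adj_map hpre.1 hpre.2]
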